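-- pv_equiv track=rewrite | github.com/mdnahidmolla/URI-Online-Judge-Solutions-in-Python | URI-Online-Judge-Solutions-in-Python/1158 - Sum of Consecutive Odd Numbers III.py | cria_lista
-- ===== SOURCE A (Python) =====
-- def cria_lista(x, y):
--     lista = []
--     while len(lista) != y:
--         if impar(x) == True:
--             lista.append(x)
--         else:
--             lista.append(x+1)
--         x += 2
--     return lista
--
-- impar = lambda a:a % 2 != 0
-- ===== SOURCE B (Python) =====
-- def cria_lista(x, y):
--     start = x if x % 2 != 0 else x + 1
--     return list(range(start, start + 2 * y, 2))
-- ===== Notes on version B (the rewrite author's own statement) =====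
-- stated objective: simpler
-- what changed: Replaced the accumulate-until-length loop with a per-iteration parity test by computing the first odd value once and emitting the whole arithmetic progression as a single range with step 2.
import Mathlib
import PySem

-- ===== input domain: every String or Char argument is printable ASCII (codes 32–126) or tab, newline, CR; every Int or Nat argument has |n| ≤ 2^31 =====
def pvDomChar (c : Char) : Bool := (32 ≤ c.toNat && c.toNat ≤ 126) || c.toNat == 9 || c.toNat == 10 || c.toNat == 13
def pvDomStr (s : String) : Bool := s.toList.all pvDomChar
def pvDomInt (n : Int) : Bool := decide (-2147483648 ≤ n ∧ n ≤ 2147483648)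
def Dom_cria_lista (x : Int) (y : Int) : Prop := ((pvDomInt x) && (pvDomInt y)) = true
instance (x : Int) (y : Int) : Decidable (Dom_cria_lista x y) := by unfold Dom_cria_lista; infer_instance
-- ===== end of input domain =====

-- B computes the first odd value once and emits the progression as a single step-2 range,
-- replacing A's accumulate-until-length loop with its per-iteration parity test (objective: simpler).


-- ===== PORT A =====
-- impar = lambda a: a % 2 != 0
def impar (a : Int) : Bool := a % 2 != 0

-- the while loop: runs until len(lista) == y; under Pre_ (0 ≤ y) that is exactly
-- y.toNat iterations, which serves as the structural fuel
def criaListaLoop : Nat → Int → List Int → List Int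
  | 0, _, lista => lista
  | n + 1, x, lista =>
      criaListaLoop n (x + 2) (lista ++ [if impar x = true then x else x + 1])

def cria_lista (x : Int) (y : Int) : List Int :=
  criaListaLoop y.toNat x []

-- ===== PORT B =====
def cria_lista_alt (x : Int) (y : Int) : List Int :=
  let start := if x % 2 ≠ 0 then x else x + 1
  PySem.List.pyRange start (start + 2 * y) 2

-- ===== PRECONDITION & SPEC =====
-- Pre_ excludes y < 0, on which A's while loop never terminates (len(lista) can never equal y).
def Pre_cria_lista (x : Int) (y : Int) : Prop := 0 ≤ y
instance (x : Int) (y : Int) : Decidable (Pre_cria_lista x y) := by unfold Pre_cria_lista; infer_instance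
def pvWitness_cria_lista : Int × Int := (3, 4)

def Spec_cria_lista (x : Int) (y : Int) (out : List Int) : Prop := out = cria_lista_alt x y
instance (x : Int) (y : Int) (out : List Int) : Decidable (Spec_cria_lista x y out) := by unfold Spec_cria_lista; infer_instance

-- ===== CLAIM (what is proved, stated in full; the proofs are below) =====
def Claim_equal_cria_lista : Prop := ∀ (x : Int) (y : Int), Dom_cria_lista x y → Pre_cria_lista x y → Spec_cria_lista x y (cria_lista x y)

-- ===== LEMMAS AND PROOFS =====

-- the first element A would append, as a function of x
def pvStart (x : Int) : Int := if x % 2 ≠ 0 then x else x + 1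

theorem pvStart_add_two (x : Int) : pvStart (x + 2) = pvStart x + 2 := by
  unfold pvStart
  have h : (x + 2) % 2 = x % 2 := by omega
  rw [h]
  split_ifs <;> ring

theorem criaListaLoop_eq (n : Nat) : ∀ (x : Int) (lista : List Int),
    criaListaLoop n x lista = lista ++ (List.range n).map (fun k : Nat => pvStart x + 2 * (k : Int)) := by
  induction n with
  | zero => intro x lista; simp [criaListaLoop]
  | succ n ih =>
    intro x lista
    have happ : (if impar x = true then x else x + 1) = pvStart x := by
      unfold impar pvStart
      split_ifs with h1 h2 <;> simp_all
    rw [criaListaLoop, ih, happ, pvStart_add_two, List.range_succ_eq_map,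
        List.map_cons, List.map_map, List.append_assoc, List.singleton_append]
    congr 2
    · ring
    · apply List.map_congr_left
      intro k _
      simp [Function.comp, Nat.succ_eq_add_one]
      ring

theorem cria_lista_spec : Claim_equal_cria_lista := by
  intro x y _ hy
  unfold Spec_cria_lista cria_lista cria_lista_alt
  rw [criaListaLoop_eq]
  show _ = PySem.List.pyRange (pvStart x) (pvStart x + 2 * y) 2
  rw [PySem.List.pyRange_of_pos _ _ (by norm_num : (0:Int) < 2)]
  rw [List.nil_append]
  rcases Int.eq_ofNat_of_zero_le hy with ⟨n, rfl⟩
  have h1 : (if (pvStart x) < pvStart x + 2 * (n : Int) then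
      ((pvStart x + 2 * (n : Int) - pvStart x + 2 - 1) / 2).toNat else 0) = n := by
    by_cases hn : n = 0
    · subst hn; rw [if_neg (by omega)]
    · rw [if_pos (by omega)]; omega
  rw [h1, Int.toNat_natCast]
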